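-- pv_equiv track=rewrite | github.com/Vexiona/metrical-viewer | src/common.py | parse_scheme
-- ===== SOURCE A (Python) =====
-- FOOT_TOKENS = {
--     'D': 'D',       # Dactyl
--     'S': 'S',       # Spondee
--     'T': 'T',       # Trochee
--     'I': 'I',       # Iamb
--     'P': 'P',       # Pyrrhic
--     'Ap': 'A',      # Anapest
--     'Cr': 'C',      # Cretic
--     'Abacc': 'B',   # Antibacchius
--     'Tb': 'b',      # Tribrach
-- }
--
-- _TOKENS_BY_LENGTH = sorted(FOOT_TOKENS, key=len, reverse=True)
--
-- def parse_scheme(scheme_raw, num_feet=None):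
--     """Parse a scheme string into internal format.
--
--     Returns scheme string or None on failure.
--     """
--     result = []
--     s = scheme_raw.strip()
--     i = 0
--     while i < len(s):
--         if s[i] == ' ':
--             i += 1
--             continue
--         matched = False
--         for tok in _TOKENS_BY_LENGTH:
--             if s[i:i+len(tok)] == tok:
--                 result.append(FOOT_TOKENS[tok])
--                 i += len(tok)
--                 matched = True
--                 break
--         if not matched:
--             return None
--     if not result:
--         return None
--     if num_feet is not None and len(result) != num_feet:
--         return None
--     return ''.join(result)
-- ===== SOURCE B (Python) =====
-- def parse_scheme(scheme_raw, num_feet=None):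
--     """Parse a scheme string into internal format.
--
--     First-character dispatch: each head char decides the token directly
--     (with a fixed lookahead for Tb / Cr / Ap / Abacc), so no scan over a
--     token table is needed.  Returns scheme string or None on failure.
--     """
--     s = scheme_raw.strip()
--     codes = []
--     i, n = 0, len(s)
--     while i < n:
--         c = s[i]
--         if c == ' ':
--             i += 1
--         elif c in 'DSIP':
--             codes.append(c)
--             i += 1
--         elif c == 'T':
--             if s[i+1:i+2] == 'b':
--                 codes.append('b')
--                 i += 2
--             else:
--                 codes.append('T')
--                 i += 1
--         elif c == 'C':
--             if s[i+1:i+2] == 'r':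
--                 codes.append('C')
--                 i += 2
--             else:
--                 return None
--         elif c == 'A':
--             if s[i+1:i+2] == 'p':
--                 codes.append('A')
--                 i += 2
--             elif s[i+1:i+5] == 'bacc':
--                 codes.append('B')
--                 i += 5
--             else:
--                 return None
--         else:
--             return None
--     if not codes:
--         return None
--     if num_feet is not None and len(codes) != num_feet:
--         return None
--     return ''.join(codes)
-- ===== Notes on version B (the rewrite author's own statement) =====
-- stated objective: alternative
-- what changed: B tokenizes by a direct first-character dispatch (each head character decides the token, with a fixed one- or four-character lookahead for Tb/Cr/Ap/Abacc), replacing A's scan of the length-sorted token table with prefix slicing at every position.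
import Mathlib
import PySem

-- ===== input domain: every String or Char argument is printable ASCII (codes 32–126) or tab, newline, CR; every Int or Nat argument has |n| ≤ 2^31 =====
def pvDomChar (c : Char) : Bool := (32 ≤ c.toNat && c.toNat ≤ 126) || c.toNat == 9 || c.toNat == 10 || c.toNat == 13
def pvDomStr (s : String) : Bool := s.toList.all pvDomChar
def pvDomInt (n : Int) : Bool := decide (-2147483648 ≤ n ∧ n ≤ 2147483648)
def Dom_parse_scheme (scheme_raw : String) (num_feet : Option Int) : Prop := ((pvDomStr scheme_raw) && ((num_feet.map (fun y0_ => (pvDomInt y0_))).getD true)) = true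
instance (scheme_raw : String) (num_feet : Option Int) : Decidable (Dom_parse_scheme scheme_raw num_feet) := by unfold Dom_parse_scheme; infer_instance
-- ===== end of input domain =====

-- B replaces A's scan of the length-sorted token table at every position by a direct
-- first-character dispatch with fixed lookaheads (Tb/Cr/Ap/Abacc); same return value everywhere.

-- ===== PORT A =====
def pyFOOT_TOKENS : PySem.Dict String String :=
  PySem.Dict.ofList [("D","D"),("S","S"),("T","T"),("I","I"),("P","P"),
                     ("Ap","A"),("Cr","C"),("Abacc","B"),("Tb","b")]

-- _TOKENS_BY_LENGTH = sorted(FOOT_TOKENS, key=len, reverse=True)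
def pyTokensByLength : List String :=
  PySem.List.sorted (PySem.Dict.keys pyFOOT_TOKENS) (fun t => PySem.Str.len t) true

-- the inner 'for tok in _TOKENS_BY_LENGTH' loop: s[i:i+len(tok)] == tok, then FOOT_TOKENS[tok]
-- (the key is always present, so dict indexing FOOT_TOKENS[tok] is exact as getD;
--  position i is carried as the remaining character list, so s[i:i+len(tok)] is take)
def pyTryTok : List String → List Char → Option (String × List Char)
  | [], _ => none
  | tok :: rest, cs =>
      if cs.take tok.toList.length = tok.toList then
        some (PySem.Dict.getD pyFOOT_TOKENS tok "", cs.drop tok.toList.length)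
      else pyTryTok rest cs

-- fuel (initial value: the string length) only makes the while-loop total for Lean;
-- each iteration consumes at least one character, so it never runs out
def pyLoopA : Nat → List Char → List String → Option (List String)
  | _, [], acc => some acc
  | 0, _ :: _, _ => none
  | fuel + 1, c :: cs, acc =>
    if c = ' ' then pyLoopA fuel cs acc
    else
      match pyTryTok pyTokensByLength (c :: cs) with
      | some (code, rest) => pyLoopA fuel rest (acc ++ [code])
      | none => none

def parse_scheme (scheme_raw : String) (num_feet : Option Int) : Option String :=
  match pyLoopA (PySem.Str.strip scheme_raw).toList.length (PySem.Str.strip scheme_raw).toList [] with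
  | none => none
  | some result =>
    if result = [] then none
    else
      match num_feet with
      | some nf => if (result.length : Int) ≠ nf then none else some (PySem.Str.join "" result)
      | none => some (PySem.Str.join "" result)

-- ===== PORT B =====
-- first-character dispatch with fixed lookahead slices (s[i+1:i+2], s[i+1:i+5] are take on the rest);
-- codes accumulated as chars, ''.join of 1-char strings is String.ofList
def altLoop : Nat → List Char → List Char → Option (List Char)
  | _, [], acc => some acc
  | 0, _ :: _, _ => none
  | fuel + 1, c :: cs, acc =>
    if c = ' ' then altLoop fuel cs acc
    else if c = 'D' ∨ c = 'S' ∨ c = 'I' ∨ c = 'P' then altLoop fuel cs (acc ++ [c])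
    else if c = 'T' then
      if cs.take 1 = ['b'] then altLoop fuel (cs.drop 1) (acc ++ ['b'])
      else altLoop fuel cs (acc ++ ['T'])
    else if c = 'C' then
      if cs.take 1 = ['r'] then altLoop fuel (cs.drop 1) (acc ++ ['C'])
      else none
    else if c = 'A' then
      if cs.take 1 = ['p'] then altLoop fuel (cs.drop 1) (acc ++ ['A'])
      else if cs.take 4 = ['b','a','c','c'] then altLoop fuel (cs.drop 4) (acc ++ ['B'])
      else none
    else none

def parse_scheme_alt (scheme_raw : String) (num_feet : Option Int) : Option String :=
  match altLoop (PySem.Str.strip scheme_raw).toList.length (PySem.Str.strip scheme_raw).toList [] with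
  | none => none
  | some codes =>
    if codes = [] then none
    else
      match num_feet with
      | some nf => if (codes.length : Int) ≠ nf then none else some (String.ofList codes)
      | none => some (String.ofList codes)

-- ===== PRECONDITION & SPEC =====
def Spec_parse_scheme (scheme_raw : String) (num_feet : Option Int) (out : Option String) : Prop := out = parse_scheme_alt scheme_raw num_feet
instance (scheme_raw : String) (num_feet : Option Int) (out : Option String) : Decidable (Spec_parse_scheme scheme_raw num_feet out) := by unfold Spec_parse_scheme; infer_instance

-- ===== CLAIM (what is proved, stated in full; the proofs are below) =====
def Claim_equal_parse_scheme : Prop := ∀ (scheme_raw : String) (num_feet : Option Int), Dom_parse_scheme scheme_raw num_feet → Spec_parse_scheme scheme_raw num_feet (parse_scheme scheme_raw num_feet)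

-- ===== LEMMAS AND PROOFS =====

lemma toks : pyTokensByLength = ["Abacc", "Ap", "Cr", "Tb", "D", "S", "T", "I", "P"] := by decide

lemma tlAbacc : ("Abacc" : String).toList = ['A','b','a','c','c'] := by decide
lemma tlAp : ("Ap" : String).toList = ['A','p'] := by decide
lemma tlCr : ("Cr" : String).toList = ['C','r'] := by decide
lemma tlTb : ("Tb" : String).toList = ['T','b'] := by decide
lemma tlD : ("D" : String).toList = ['D'] := by decide
lemma tlS : ("S" : String).toList = ['S'] := by decide
lemma tlT : ("T" : String).toList = ['T'] := by decide
lemma tlI : ("I" : String).toList = ['I'] := by decide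
lemma tlP : ("P" : String).toList = ['P'] := by decide
lemma gD : PySem.Dict.getD pyFOOT_TOKENS "D" "" = String.ofList ['D'] := by decide
lemma gS : PySem.Dict.getD pyFOOT_TOKENS "S" "" = String.ofList ['S'] := by decide
lemma gT : PySem.Dict.getD pyFOOT_TOKENS "T" "" = String.ofList ['T'] := by decide
lemma gI : PySem.Dict.getD pyFOOT_TOKENS "I" "" = String.ofList ['I'] := by decide
lemma gP : PySem.Dict.getD pyFOOT_TOKENS "P" "" = String.ofList ['P'] := by decide
lemma gA : PySem.Dict.getD pyFOOT_TOKENS "Ap" "" = String.ofList ['A'] := by decide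
lemma gC : PySem.Dict.getD pyFOOT_TOKENS "Cr" "" = String.ofList ['C'] := by decide
lemma gB : PySem.Dict.getD pyFOOT_TOKENS "Abacc" "" = String.ofList ['B'] := by decide
lemma gb : PySem.Dict.getD pyFOOT_TOKENS "Tb" "" = String.ofList ['b'] := by decide

lemma pyLoopA_some (n : Nat) (c : Char) (cs rest : List Char) (code : String) (acc : List String)
    (hc : ¬ c = ' ') (htry : pyTryTok pyTokensByLength (c :: cs) = some (code, rest)) :
    pyLoopA (n + 1) (c :: cs) acc = pyLoopA n rest (acc ++ [code]) := by
  simp only [pyLoopA, if_neg hc, htry]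

lemma pyLoopA_none (n : Nat) (c : Char) (cs : List Char) (acc : List String)
    (hc : ¬ c = ' ') (htry : pyTryTok pyTokensByLength (c :: cs) = none) :
    pyLoopA (n + 1) (c :: cs) acc = none := by
  simp only [pyLoopA, if_neg hc, htry]

lemma loop_eq : ∀ (n : ℕ) (cs : List Char), cs.length ≤ n → ∀ accB : List Char,
    pyLoopA n cs (accB.map (fun c => String.ofList [c])) =
      (altLoop n cs accB).map (List.map (fun c => String.ofList [c])) := by
  intro n
  induction n with
  | zero =>
    intro cs hlen accB
    cases cs with
    | nil => simp only [pyLoopA, altLoop, Option.map_some]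
    | cons c cs => simp at hlen
  | succ n ih =>
    intro cs hlen accB
    cases cs with
    | nil => simp only [pyLoopA, altLoop, Option.map_some]
    | cons c cs =>
      have hlen' : cs.length ≤ n := by simp at hlen; omega
      by_cases hsp : c = ' '
      · subst hsp
        have ihx := ih cs hlen' accB
        simp only [pyLoopA, altLoop]
        simpa using ihx
      · by_cases hD : c = 'D'
        · subst hD
          have htry : pyTryTok pyTokensByLength ('D' :: cs) = some (String.ofList ['D'], cs) := by
            rw [toks]; simp [pyTryTok, tlAbacc, tlAp, tlCr, tlTb, tlD, gD]
          rw [pyLoopA_some _ _ _ _ _ _ hsp htry]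
          simp only [altLoop]
          simpa [List.map_append] using ih cs hlen' (accB ++ ['D'])
        · by_cases hS : c = 'S'
          · subst hS
            have htry : pyTryTok pyTokensByLength ('S' :: cs) = some (String.ofList ['S'], cs) := by
              rw [toks]; simp [pyTryTok, tlAbacc, tlAp, tlCr, tlTb, tlD, tlS, gS]
            rw [pyLoopA_some _ _ _ _ _ _ hsp htry]
            simp only [altLoop]
            simpa [List.map_append] using ih cs hlen' (accB ++ ['S'])
          · by_cases hI : c = 'I'
            · subst hI
              have htry : pyTryTok pyTokensByLength ('I' :: cs) = some (String.ofList ['I'], cs) := by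
                rw [toks]; simp [pyTryTok, tlAbacc, tlAp, tlCr, tlTb, tlD, tlS, tlT, tlI, gI]
              rw [pyLoopA_some _ _ _ _ _ _ hsp htry]
              simp only [altLoop]
              simpa [List.map_append] using ih cs hlen' (accB ++ ['I'])
            · by_cases hP : c = 'P'
              · subst hP
                have htry : pyTryTok pyTokensByLength ('P' :: cs) = some (String.ofList ['P'], cs) := by
                  rw [toks]; simp [pyTryTok, tlAbacc, tlAp, tlCr, tlTb, tlD, tlS, tlT, tlI, tlP, gP]
                rw [pyLoopA_some _ _ _ _ _ _ hsp htry]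
                simp only [altLoop]
                simpa [List.map_append] using ih cs hlen' (accB ++ ['P'])
              · by_cases hT : c = 'T'
                · subst hT
                  cases cs with
                  | nil =>
                    have htry : pyTryTok pyTokensByLength ['T'] = some (String.ofList ['T'], []) := by
                      rw [toks]; simp [pyTryTok, tlAbacc, tlAp, tlCr, tlTb, tlD, tlS, tlT, gT]
                    rw [pyLoopA_some _ _ _ _ _ _ hsp htry]
                    simp only [altLoop]
                    simpa [altLoop, List.map_append] using ih [] (by simp) (accB ++ ['T'])
                  | cons x cs1 =>
                    have hlen1 : cs1.length ≤ n := by simp at hlen; omega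
                    by_cases hxb : x = 'b'
                    · subst hxb
                      have htry : pyTryTok pyTokensByLength ('T' :: 'b' :: cs1) = some (String.ofList ['b'], cs1) := by
                        rw [toks]; simp [pyTryTok, tlAbacc, tlAp, tlCr, tlTb, gb]
                      rw [pyLoopA_some _ _ _ _ _ _ hsp htry]
                      simp only [altLoop]
                      simpa [List.map_append] using ih cs1 hlen1 (accB ++ ['b'])
                    · have htry : pyTryTok pyTokensByLength ('T' :: x :: cs1) = some (String.ofList ['T'], x :: cs1) := by
                        rw [toks]; simp [pyTryTok, tlAbacc, tlAp, tlCr, tlTb, tlD, tlS, tlT, gT, hxb]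
                      rw [pyLoopA_some _ _ _ _ _ _ hsp htry]
                      simp only [altLoop]
                      simpa [altLoop, List.map_append, hxb] using ih (x :: cs1) hlen' (accB ++ ['T'])
                · by_cases hC : c = 'C'
                  · subst hC
                    cases cs with
                    | nil =>
                      have htry : pyTryTok pyTokensByLength ['C'] = none := by
                        rw [toks]; simp [pyTryTok, tlAbacc, tlAp, tlCr, tlTb, tlD, tlS, tlT, tlI, tlP]
                      rw [pyLoopA_none _ _ _ _ hsp htry]
                      simp only [altLoop]
                      simp
                    | cons x cs1 =>
                      have hlen1 : cs1.length ≤ n := by simp at hlen; omega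
                      by_cases hxr : x = 'r'
                      · subst hxr
                        have htry : pyTryTok pyTokensByLength ('C' :: 'r' :: cs1) = some (String.ofList ['C'], cs1) := by
                          rw [toks]; simp [pyTryTok, tlAbacc, tlAp, tlCr, gC]
                        rw [pyLoopA_some _ _ _ _ _ _ hsp htry]
                        simp only [altLoop]
                        simpa [List.map_append] using ih cs1 hlen1 (accB ++ ['C'])
                      · have htry : pyTryTok pyTokensByLength ('C' :: x :: cs1) = none := by
                          rw [toks]; simp [pyTryTok, tlAbacc, tlAp, tlCr, tlTb, tlD, tlS, tlT, tlI, tlP, hxr]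
                        rw [pyLoopA_none _ _ _ _ hsp htry]
                        simp only [altLoop]
                        simp [hxr]
                  · by_cases hA : c = 'A'
                    · subst hA
                      cases cs with
                      | nil =>
                        have htry : pyTryTok pyTokensByLength ['A'] = none := by
                          rw [toks]; simp [pyTryTok, tlAbacc, tlAp, tlCr, tlTb, tlD, tlS, tlT, tlI, tlP]
                        rw [pyLoopA_none _ _ _ _ hsp htry]
                        simp only [altLoop]
                        simp
                      | cons x cs1 =>
                        by_cases hxp : x = 'p'
                        · subst hxp
                          have hlen1 : cs1.length ≤ n := by simp at hlen; omega
                          have htry : pyTryTok pyTokensByLength ('A' :: 'p' :: cs1) = some (String.ofList ['A'], cs1) := by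
                            rw [toks]; simp [pyTryTok, tlAbacc, tlAp, gA]
                          rw [pyLoopA_some _ _ _ _ _ _ hsp htry]
                          simp only [altLoop]
                          simpa [List.map_append] using ih cs1 hlen1 (accB ++ ['A'])
                        · by_cases hxb : x = 'b'
                          · subst hxb
                            cases cs1 with
                            | nil =>
                              have htry : pyTryTok pyTokensByLength ['A','b'] = none := by
                                rw [toks]; simp [pyTryTok, tlAbacc, tlAp, tlCr, tlTb, tlD, tlS, tlT, tlI, tlP]
                              rw [pyLoopA_none _ _ _ _ hsp htry]
                              simp only [altLoop]
                              simp
                            | cons y cs2 =>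
                              by_cases hya : y = 'a'
                              · subst hya
                                cases cs2 with
                                | nil =>
                                  have htry : pyTryTok pyTokensByLength ['A','b','a'] = none := by
                                    rw [toks]; simp [pyTryTok, tlAbacc, tlAp, tlCr, tlTb, tlD, tlS, tlT, tlI, tlP]
                                  rw [pyLoopA_none _ _ _ _ hsp htry]
                                  simp only [altLoop]
                                  simp
                                | cons z cs3 =>
                                  by_cases hzc : z = 'c'
                                  · subst hzc
                                    cases cs3 with
                                    | nil =>
                                      have htry : pyTryTok pyTokensByLength ['A','b','a','c'] = none := by
                                        rw [toks]; simp [pyTryTok, tlAbacc, tlAp, tlCr, tlTb, tlD, tlS, tlT, tlI, tlP]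
                                      rw [pyLoopA_none _ _ _ _ hsp htry]
                                      simp only [altLoop]
                                      simp
                                    | cons w cs4 =>
                                      by_cases hwc : w = 'c'
                                      · subst hwc
                                        have hlen4 : cs4.length ≤ n := by simp at hlen; omega
                                        have htry : pyTryTok pyTokensByLength ('A' :: 'b' :: 'a' :: 'c' :: 'c' :: cs4) = some (String.ofList ['B'], cs4) := by
                                          rw [toks]; simp [pyTryTok, tlAbacc, gB]
                                        rw [pyLoopA_some _ _ _ _ _ _ hsp htry]
                                        simp only [altLoop]
                                        simpa [List.map_append] using ih cs4 hlen4 (accB ++ ['B'])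
                                      · have htry : pyTryTok pyTokensByLength ('A' :: 'b' :: 'a' :: 'c' :: w :: cs4) = none := by
                                          rw [toks]; simp [pyTryTok, tlAbacc, tlAp, tlCr, tlTb, tlD, tlS, tlT, tlI, tlP, hwc]
                                        rw [pyLoopA_none _ _ _ _ hsp htry]
                                        simp only [altLoop]
                                        simp [hwc]
                                  · have htry : pyTryTok pyTokensByLength ('A' :: 'b' :: 'a' :: z :: cs3) = none := by
                                      rw [toks]; simp [pyTryTok, tlAbacc, tlAp, tlCr, tlTb, tlD, tlS, tlT, tlI, tlP, hzc]
                                    rw [pyLoopA_none _ _ _ _ hsp htry]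
                                    simp only [altLoop]
                                    simp [hzc]
                              · have htry : pyTryTok pyTokensByLength ('A' :: 'b' :: y :: cs2) = none := by
                                  rw [toks]; simp [pyTryTok, tlAbacc, tlAp, tlCr, tlTb, tlD, tlS, tlT, tlI, tlP, hya]
                                rw [pyLoopA_none _ _ _ _ hsp htry]
                                simp only [altLoop]
                                simp [hya]
                          · have htry : pyTryTok pyTokensByLength ('A' :: x :: cs1) = none := by
                              rw [toks]; simp [pyTryTok, tlAbacc, tlAp, tlCr, tlTb, tlD, tlS, tlT, tlI, tlP, hxp, hxb]
                            rw [pyLoopA_none _ _ _ _ hsp htry]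
                            simp only [altLoop]
                            simp [hxp, hxb]
                    · have htry : pyTryTok pyTokensByLength (c :: cs) = none := by
                        rw [toks]; simp [pyTryTok, tlAbacc, tlAp, tlCr, tlTb, tlD, tlS, tlT, tlI, tlP, hD, hS, hI, hP, hT, hC, hA]
                      rw [pyLoopA_none _ _ _ _ hsp htry]
                      simp only [altLoop]
                      simp [hsp, hD, hS, hI, hP, hT, hC, hA]

lemma join_singles (l : List Char) :
    PySem.Str.join "" (l.map (fun c => String.ofList [c])) = String.ofList l := by
  have h : (PySem.Str.join "" (l.map (fun c => String.ofList [c]))).toList = l := by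
    rw [PySem.Str.toList_join]
    simp only [List.map_map]
    have hcomp : (String.toList ∘ fun c : Char => String.ofList [c]) = fun c : Char => [c] := by
      funext c; simp
    rw [hcomp]
    simp
  calc PySem.Str.join "" (l.map (fun c => String.ofList [c]))
      = String.ofList ((PySem.Str.join "" (l.map (fun c => String.ofList [c]))).toList) :=
        String.ofList_toList.symm
    _ = String.ofList l := by rw [h]

-- ===== VERDICT (by name: the statement is the Claim_ definition above) =====
theorem parse_scheme_spec : Claim_equal_parse_scheme := by
  intro scheme_raw num_feet _
  unfold Spec_parse_scheme parse_scheme parse_scheme_alt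
  have h := loop_eq (PySem.Str.strip scheme_raw).toList.length (PySem.Str.strip scheme_raw).toList le_rfl []
  simp only [List.map_nil] at h
  rw [h]
  cases halt : altLoop (PySem.Str.strip scheme_raw).toList.length (PySem.Str.strip scheme_raw).toList [] with
  | none => simp
  | some codes =>
    simp only [Option.map_some]
    by_cases hnil : codes = []
    · simp [hnil]
    · have hnil' : codes.map (fun c => String.ofList [c]) ≠ [] := by simpa using hnil
      simp only [if_neg hnil, if_neg hnil']
      cases num_feet with
      | none => simp [join_singles]
      | some nf =>
        simp only [List.length_map]
        split_ifs with hlen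
        · rfl
        · simp [join_singles]
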